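-- pv_equiv track=rewrite | github.com/MiguelVarasB/Telegram | routes/media_common.py | _build_page_links
-- ===== SOURCE A (Python) =====
-- def _build_page_links(page: int, total_pages: int):
--     """
--     Genera una lista de páginas con el patrón clásico 1 .. N.
--     Reglas:
--     - Si hay pocas páginas (<=12), las muestra todas.
--     - Si el usuario está al inicio (página <= 8), muestra 1..10, elipsis y las últimas 2.
--     - Si está al final (página >= total_pages-7), muestra 1,2, elipsis y las últimas 10.
--     - En el medio, muestra 1,2, elipsis, una ventana centrada en la página (5 ítems), elipsis y las últimas 2.
--     """
--     if total_pages <= 12: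
--         return list(range(1, total_pages + 1))
--
--     pages = []
--
--     def _push(n):
--         if n is None:
--             pages.append(None)
--             return
--         if 1 <= n <= total_pages and n not in pages:
--             pages.append(n)
--
--     if page <= 8:
--         for n in range(1, 11):
--             _push(n)
--         _push(None)  # elipsis
--         _push(total_pages - 1)
--         _push(total_pages)
--     elif page >= total_pages - 7:
--         _push(1)
--         _push(2)
--         _push(None)
--         for n in range(total_pages - 9, total_pages + 1):
--             _push(n)
--     else:
--         _push(1)
--         _push(2)
--         _push(None)
--         for n in range(page - 2, page + 3):
--             _push(n)
--         _push(None)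
--         _push(total_pages - 1)
--         _push(total_pages)
--
--     # Limpiar posibles duplicados y ordenar, preservando elipsis
--     cleaned = []
--     prev_num = None
--     for n in pages:
--         if n is None:
--             if cleaned and cleaned[-1] is not None:
--                 cleaned.append(None)
--             prev_num = None
--         else:
--             if n != prev_num:
--                 cleaned.append(n)
--                 prev_num = n
--     if cleaned and cleaned[-1] is None:
--         cleaned.pop()
--     return cleaned
-- ===== SOURCE B (Python) =====
-- def _build_page_links(page: int, total_pages: int):
--     if total_pages <= 12:
--         return list(range(1, total_pages + 1))
--     if page <= 8:
--         nums = list(range(1, 11)) + [total_pages - 1, total_pages]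
--     elif page >= total_pages - 7:
--         nums = [1, 2] + list(range(total_pages - 9, total_pages + 1))
--     else:
--         nums = [1, 2] + list(range(page - 2, page + 3)) + [total_pages - 1, total_pages]
--     links = [nums[0]]
--     for prev, n in zip(nums, nums[1:]):
--         if n - prev > 1:
--             links.append(None)
--         links.append(n)
--     return links
-- ===== Notes on version B (the rewrite author's own statement) =====
-- stated objective: simpler
-- what changed: B builds per branch just the sorted candidate page list and derives each ellipsis from a gap > 1 between consecutive pages in one zip pass, instead of A's push-with-membership-check placement of None markers followed by a separate dedup/cleanup pass.
import Mathlib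
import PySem

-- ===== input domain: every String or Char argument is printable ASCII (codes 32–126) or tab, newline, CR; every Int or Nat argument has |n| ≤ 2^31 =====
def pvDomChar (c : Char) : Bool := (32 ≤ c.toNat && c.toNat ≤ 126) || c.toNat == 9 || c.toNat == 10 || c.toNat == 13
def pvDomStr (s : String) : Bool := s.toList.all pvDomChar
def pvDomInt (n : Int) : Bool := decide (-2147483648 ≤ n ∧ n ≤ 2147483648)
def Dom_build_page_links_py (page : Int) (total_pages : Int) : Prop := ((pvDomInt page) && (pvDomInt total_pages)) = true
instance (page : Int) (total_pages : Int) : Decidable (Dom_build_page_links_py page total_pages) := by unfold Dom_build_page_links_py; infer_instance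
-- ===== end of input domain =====

-- B derives ellipses from gaps in a sorted candidate list in one pass, instead of A's
-- push-with-membership placement of None markers plus a separate dedup/cleanup pass (objective: simpler).

-- ===== PORT A =====
-- the inner `_push` closure of A (captures total_pages and the accumulated `pages`)
def pushA (total_pages : Int) (pages : List (Option Int)) (n : Option Int) : List (Option Int) :=
  match n with
  | none => pages ++ [none]
  | some m =>
      if 1 ≤ m ∧ m ≤ total_pages ∧ ¬ pages.contains (some m) then pages ++ [some m] else pages

-- one step of A's cleanup loop; state = (cleaned, prev_num)
def cleanStepA (st : List (Option Int) × Option Int) (n : Option Int) : List (Option Int) × Option Int :=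
  match n with
  | none => (if st.1 ≠ [] ∧ st.1.getLast? ≠ some none then st.1 ++ [none] else st.1, none)
  | some m => if some m ≠ st.2 then (st.1 ++ [some m], some m) else st

-- A's final dedup/trailing-ellipsis cleanup (the loop after the branches plus the trailing pop)
def cleanA (pages : List (Option Int)) : List (Option Int) :=
  let cleaned := (pages.foldl cleanStepA ([], none)).1
  if cleaned ≠ [] ∧ cleaned.getLast? = some none then cleaned.dropLast else cleaned

def build_page_links_py (page : Int) (total_pages : Int) : List (Option Int) :=
  if total_pages ≤ 12 then (PySem.List.pyRange 1 (total_pages + 1) 1).map some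
  else
    cleanA
      (if page ≤ 8 then
        pushA total_pages
          (pushA total_pages
            (pushA total_pages
              ((PySem.List.pyRange 1 11 1).foldl (fun ac n => pushA total_pages ac (some n)) [])
              none)
            (some (total_pages - 1)))
          (some total_pages)
      else if page ≥ total_pages - 7 then
        (PySem.List.pyRange (total_pages - 9) (total_pages + 1) 1).foldl
          (fun ac n => pushA total_pages ac (some n))
          (pushA total_pages (pushA total_pages (pushA total_pages [] (some 1)) (some 2)) none)
      else
        pushA total_pages
          (pushA total_pages
            (pushA total_pages
              ((PySem.List.pyRange (page - 2) (page + 3) 1).foldl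
                (fun ac n => pushA total_pages ac (some n))
                (pushA total_pages (pushA total_pages (pushA total_pages [] (some 1)) (some 2)) none))
              none)
            (some (total_pages - 1)))
          (some total_pages))

-- ===== PORT B =====
def build_page_links_py_alt (page : Int) (total_pages : Int) : List (Option Int) :=
  if total_pages ≤ 12 then (PySem.List.pyRange 1 (total_pages + 1) 1).map some
  else
    let nums : List Int :=
      if page ≤ 8 then PySem.List.pyRange 1 11 1 ++ [total_pages - 1, total_pages]
      else if page ≥ total_pages - 7 then [1, 2] ++ PySem.List.pyRange (total_pages - 9) (total_pages + 1) 1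
      else [1, 2] ++ PySem.List.pyRange (page - 2) (page + 3) 1 ++ [total_pages - 1, total_pages]
    -- nums[0]: nums is nonempty in every branch, so headI is exact here
    (nums.zip nums.tail).foldl
      (fun links pn => links ++ (if pn.2 - pn.1 > 1 then [none, some pn.2] else [some pn.2]))
      [some nums.headI]

-- ===== PRECONDITION & SPEC =====
def Spec_build_page_links_py (page : Int) (total_pages : Int) (out : List (Option Int)) : Prop := out = build_page_links_py_alt page total_pages
instance (page : Int) (total_pages : Int) (out : List (Option Int)) : Decidable (Spec_build_page_links_py page total_pages out) := by unfold Spec_build_page_links_py; infer_instance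

-- ===== CLAIM (what is proved, stated in full; the proofs are below) =====
def Claim_equal_build_page_links_py : Prop := ∀ (page : Int) (total_pages : Int), Dom_build_page_links_py page total_pages → Spec_build_page_links_py page total_pages (build_page_links_py page total_pages)

-- ===== LEMMAS AND PROOFS =====

-- pushing a Nodup list of in-range fresh values just appends them
lemma fold_push (total_pages : Int) :
    ∀ (l : List Int) (pages : List (Option Int)), l.Nodup →
      (∀ n ∈ l, 1 ≤ n ∧ n ≤ total_pages ∧ ¬ pages.contains (some n)) →
      l.foldl (fun ac n => pushA total_pages ac (some n)) pages = pages ++ l.map some := by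
  intro l
  induction l with
  | nil => intro pages _ _; simp
  | cons a t ih =>
      intro pages hnd hmem
      have ha := hmem a (by simp)
      rw [List.foldl_cons]
      have hstep : pushA total_pages pages (some a) = pages ++ [some a] := by
        simp only [pushA]
        exact if_pos ha
      rw [hstep, ih (pages ++ [some a]) (List.Nodup.of_cons hnd)]
      · simp
      · intro n hn
        have := hmem n (by simp [hn])
        refine ⟨this.1, this.2.1, ?_⟩
        simp only [List.contains_append, List.contains_cons] at *
        have hna : n ≠ a := by
          intro h; exact (List.nodup_cons.mp hnd).1 (h ▸ hn)
        simp_all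

lemma pyRange_ten (a : Int) :
    PySem.List.pyRange a (a + 10) 1 = [a, a+1, a+2, a+3, a+4, a+5, a+6, a+7, a+8, a+9] := by
  rw [PySem.List.pyRange_one]
  simp [List.range_succ]

lemma pyRange_five (a : Int) :
    PySem.List.pyRange a (a + 5) 1 = [a, a+1, a+2, a+3, a+4] := by
  rw [PySem.List.pyRange_one]
  simp [List.range_succ]

lemma clean_somes : ∀ (ys : List Int) (a : Int) (acc : List (Option Int)) (prev : Option Int),
    List.IsChain (fun x y => x ≠ y) (a :: ys) → some a ≠ prev →
    ((a :: ys).map some).foldl cleanStepA (acc, prev)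
      = (acc ++ (a :: ys).map some, some ((a :: ys).getLast (List.cons_ne_nil a ys))) := by
  intro ys
  induction ys with
  | nil =>
      intro a acc prev _ hprev
      simp [cleanStepA, hprev]
  | cons b t ih =>
      intro a acc prev hch hprev
      have hstep : cleanStepA (acc, prev) (some a) = (acc ++ [some a], some a) := by
        simp [cleanStepA, hprev]
      have hab : a ≠ b := (List.isChain_cons_cons.mp hch).1
      rw [List.map_cons, List.foldl_cons, hstep,
          ih b (acc ++ [some a]) (some a) (List.isChain_cons_cons.mp hch).2
            (by simp [Ne, hab.symm])]
      simp [List.getLast_cons]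

lemma brA1 (page tp : Int) (h12 : ¬ tp ≤ 12) (h8 : page ≤ 8) :
    build_page_links_py page tp =
      [some 1, some 2, some 3, some 4, some 5, some 6, some 7, some 8, some 9, some 10,
       none, some (tp-1), some tp] := by
  unfold build_page_links_py
  rw [if_neg h12, if_pos h8]
  rw [show PySem.List.pyRange 1 11 1 = [1,2,3,4,5,6,7,8,9,10] from by decide]
  rw [fold_push tp _ [] (by decide)
    (by intro n hn; simp at hn; refine ⟨by omega, by omega, by simp⟩)]
  simp only [List.nil_append, List.map_cons, List.map_nil]
  have e1 : pushA tp [some 1, some 2, some 3, some 4, some 5, some 6, some 7, some 8, some 9, some 10] none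
      = [some 1, some 2, some 3, some 4, some 5, some 6, some 7, some 8, some 9, some 10, none] := by
    simp [pushA]
  rw [e1]
  have e2 : pushA tp [some 1, some 2, some 3, some 4, some 5, some 6, some 7, some 8, some 9, some 10, none] (some (tp-1))
      = [some 1, some 2, some 3, some 4, some 5, some 6, some 7, some 8, some 9, some 10, none, some (tp-1)] := by
    simp only [pushA]
    rw [if_pos ⟨by omega, by omega, by simp; try omega⟩]
    rfl
  rw [e2]
  have e3 : pushA tp [some 1, some 2, some 3, some 4, some 5, some 6, some 7, some 8, some 9, some 10, none, some (tp-1)] (some tp)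
      = [some 1, some 2, some 3, some 4, some 5, some 6, some 7, some 8, some 9, some 10, none, some (tp-1), some tp] := by
    simp only [pushA]
    rw [if_pos ⟨by omega, by omega, by simp; try omega⟩]
    rfl
  rw [e3]
  unfold cleanA
  rw [show ([some 1, some 2, some 3, some 4, some 5, some 6, some 7, some 8, some 9, some 10,
        none, some (tp-1), some tp] : List (Option Int))
      = ([1,2,3,4,5,6,7,8,9,10] : List Int).map some ++ (none :: ([tp-1, tp] : List Int).map some) from by simp]
  rw [List.foldl_append]
  rw [clean_somes _ _ _ _ (by decide) (by simp)]
  simp only [List.nil_append, List.map_cons, List.map_nil, List.foldl_cons]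
  have hcl : ∀ (pv : Option Int),
      cleanStepA ([some 1, some 2, some 3, some 4, some 5, some 6, some 7, some 8, some 9, some 10], pv) none
        = ([some 1, some 2, some 3, some 4, some 5, some 6, some 7, some 8, some 9, some 10, none], none) := by
    intro pv; simp [cleanStepA]
  rw [hcl]
  rw [show cleanStepA ([some 1, some 2, some 3, some 4, some 5, some 6, some 7, some 8, some 9, some 10, none], none) (some (tp-1))
      = ([some 1, some 2, some 3, some 4, some 5, some 6, some 7, some 8, some 9, some 10, none, some (tp-1)], some (tp-1)) from by
    simp [cleanStepA]]
  rw [show cleanStepA ([some 1, some 2, some 3, some 4, some 5, some 6, some 7, some 8, some 9, some 10, none, some (tp-1)], some (tp-1)) (some tp)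
      = ([some 1, some 2, some 3, some 4, some 5, some 6, some 7, some 8, some 9, some 10, none, some (tp-1), some tp], some tp) from by
    simp [cleanStepA, show tp ≠ tp - 1 from by omega]]
  simp

lemma brB1 (page tp : Int) (h12 : ¬ tp ≤ 12) (h8 : page ≤ 8) :
    build_page_links_py_alt page tp =
      [some 1, some 2, some 3, some 4, some 5, some 6, some 7, some 8, some 9, some 10,
       none, some (tp-1), some tp] := by
  unfold build_page_links_py_alt
  rw [if_neg h12, if_pos h8]
  rw [show PySem.List.pyRange 1 11 1 = [1,2,3,4,5,6,7,8,9,10] from by decide]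
  norm_num [List.zip, List.zipWith, List.foldl]
  rw [if_pos (show (1:Int) < tp - 1 - 10 by omega)]
  rfl

lemma brA2 (page tp : Int) (h12 : ¬ tp ≤ 12) (h8 : ¬ page ≤ 8) (h7 : page ≥ tp - 7) :
    build_page_links_py page tp =
      [some 1, some 2, none, some (tp-9), some (tp-8), some (tp-7), some (tp-6), some (tp-5),
       some (tp-4), some (tp-3), some (tp-2), some (tp-1), some tp] := by
  unfold build_page_links_py
  rw [if_neg h12, if_neg h8, if_pos h7]
  rw [show tp + 1 = (tp - 9) + 10 from by ring, pyRange_ten]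
  rw [show ([tp-9, tp-9+1, tp-9+2, tp-9+3, tp-9+4, tp-9+5, tp-9+6, tp-9+7, tp-9+8, tp-9+9] : List Int)
      = [tp-9, tp-8, tp-7, tp-6, tp-5, tp-4, tp-3, tp-2, tp-1, tp] from by simp; try omega]
  have e1 : pushA tp [] (some 1) = [some 1] := by
    simp only [pushA]; rw [if_pos ⟨by omega, by omega, by simp⟩]
    try rfl
  rw [e1]
  have e2 : pushA tp [some 1] (some 2) = [some 1, some 2] := by
    simp only [pushA]; rw [if_pos ⟨by omega, by omega, by simp⟩]
    try rfl
  rw [e2]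
  have e3 : pushA tp [some 1, some 2] none = [some 1, some 2, none] := by simp [pushA]
  rw [e3]
  rw [fold_push tp _ [some 1, some 2, none] (by simp; try omega)
    (by intro n hn; simp at hn; refine ⟨by omega, by omega, by simp; try omega⟩)]
  unfold cleanA
  simp only [List.cons_append, List.nil_append, List.foldl_cons]
  rw [show cleanStepA ([], none) (some 1) = ([some 1], some 1) from by simp [cleanStepA]]
  rw [show cleanStepA ([some 1], some 1) (some 2) = ([some 1, some 2], some 2) from by simp [cleanStepA]]
  rw [show cleanStepA ([some 1, some 2], some 2) none = ([some 1, some 2, none], none) from by simp [cleanStepA]]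
  rw [clean_somes _ _ _ _ (by simp [List.isChain_cons_cons]; try omega) (by simp)]
  simp

lemma brB2 (page tp : Int) (h12 : ¬ tp ≤ 12) (h8 : ¬ page ≤ 8) (h7 : page ≥ tp - 7) :
    build_page_links_py_alt page tp =
      [some 1, some 2, none, some (tp-9), some (tp-8), some (tp-7), some (tp-6), some (tp-5),
       some (tp-4), some (tp-3), some (tp-2), some (tp-1), some tp] := by
  unfold build_page_links_py_alt
  rw [if_neg h12, if_neg h8, if_pos h7]
  rw [show tp + 1 = (tp - 9) + 10 from by ring, pyRange_ten]
  rw [show ([tp-9, tp-9+1, tp-9+2, tp-9+3, tp-9+4, tp-9+5, tp-9+6, tp-9+7, tp-9+8, tp-9+9] : List Int)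
      = [tp-9, tp-8, tp-7, tp-6, tp-5, tp-4, tp-3, tp-2, tp-1, tp] from by simp; try omega]
  norm_num [List.zip, List.zipWith, List.foldl]
  rw [if_pos (show (1:Int) < tp - 9 - 2 by omega)]
  rfl

lemma brA3 (page tp : Int) (h12 : ¬ tp ≤ 12) (h8 : ¬ page ≤ 8) (h7 : ¬ page ≥ tp - 7) :
    build_page_links_py page tp =
      [some 1, some 2, none, some (page-2), some (page-1), some page, some (page+1), some (page+2),
       none, some (tp-1), some tp] := by
  unfold build_page_links_py
  rw [if_neg h12, if_neg h8, if_neg h7]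
  rw [show page + 3 = (page - 2) + 5 from by ring, pyRange_five]
  rw [show ([page-2, page-2+1, page-2+2, page-2+3, page-2+4] : List Int)
      = [page-2, page-1, page, page+1, page+2] from by simp; try omega]
  have e1 : pushA tp [] (some 1) = [some 1] := by
    simp only [pushA]; rw [if_pos ⟨by omega, by omega, by simp⟩]
    try rfl
  rw [e1]
  have e2 : pushA tp [some 1] (some 2) = [some 1, some 2] := by
    simp only [pushA]; rw [if_pos ⟨by omega, by omega, by simp⟩]
    try rfl
  rw [e2]
  have e3 : pushA tp [some 1, some 2] none = [some 1, some 2, none] := by simp [pushA]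
  rw [e3]
  rw [fold_push tp _ [some 1, some 2, none] (by simp; try omega)
    (by intro n hn; simp at hn; refine ⟨by omega, by omega, by simp; try omega⟩)]
  simp only [List.map_cons, List.map_nil, List.cons_append, List.nil_append]
  have e4 : pushA tp [some 1, some 2, none, some (page-2), some (page-1), some page, some (page+1), some (page+2)] none
      = [some 1, some 2, none, some (page-2), some (page-1), some page, some (page+1), some (page+2), none] := by
    simp [pushA]
  rw [e4]
  have e5 : pushA tp [some 1, some 2, none, some (page-2), some (page-1), some page, some (page+1), some (page+2), none] (some (tp-1))
      = [some 1, some 2, none, some (page-2), some (page-1), some page, some (page+1), some (page+2), none, some (tp-1)] := by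
    simp only [pushA]; rw [if_pos ⟨by omega, by omega, by simp; try omega⟩]
    try rfl
  rw [e5]
  have e6 : pushA tp [some 1, some 2, none, some (page-2), some (page-1), some page, some (page+1), some (page+2), none, some (tp-1)] (some tp)
      = [some 1, some 2, none, some (page-2), some (page-1), some page, some (page+1), some (page+2), none, some (tp-1), some tp] := by
    simp only [pushA]; rw [if_pos ⟨by omega, by omega, by simp; try omega⟩]
    try rfl
  rw [e6]
  unfold cleanA
  rw [show ([some 1, some 2, none, some (page-2), some (page-1), some page, some (page+1), some (page+2),
        none, some (tp-1), some tp] : List (Option Int))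
      = [some 1, some 2, none] ++ (([page-2, page-1, page, page+1, page+2] : List Int).map some
          ++ (none :: ([tp-1, tp] : List Int).map some)) from by simp]
  rw [List.foldl_append]
  rw [show List.foldl cleanStepA ([], none) [some 1, some 2, none] = ([some 1, some 2, none], none) from by
    simp only [List.foldl_cons, List.foldl_nil]
    rw [show cleanStepA ([], none) (some 1) = ([some 1], some 1) from by simp [cleanStepA]]
    rw [show cleanStepA ([some 1], some 1) (some 2) = ([some 1, some 2], some 2) from by simp [cleanStepA]]
    rw [show cleanStepA ([some 1, some 2], some 2) none = ([some 1, some 2, none], none) from by simp [cleanStepA]]]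
  rw [List.foldl_append]
  rw [clean_somes _ _ _ _ (by simp [List.isChain_cons_cons]; try omega) (by simp)]
  simp only [List.map_cons, List.map_nil, List.cons_append, List.nil_append, List.foldl_cons]
  have hcl : ∀ (pv : Option Int),
      cleanStepA ([some 1, some 2, none, some (page-2), some (page-1), some page, some (page+1), some (page+2)], pv) none
        = ([some 1, some 2, none, some (page-2), some (page-1), some page, some (page+1), some (page+2), none], none) := by
    intro pv; simp [cleanStepA]
  rw [hcl]
  rw [show cleanStepA ([some 1, some 2, none, some (page-2), some (page-1), some page, some (page+1), some (page+2), none], none) (some (tp-1))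
      = ([some 1, some 2, none, some (page-2), some (page-1), some page, some (page+1), some (page+2), none, some (tp-1)], some (tp-1)) from by
    simp [cleanStepA]]
  rw [show cleanStepA ([some 1, some 2, none, some (page-2), some (page-1), some page, some (page+1), some (page+2), none, some (tp-1)], some (tp-1)) (some tp)
      = ([some 1, some 2, none, some (page-2), some (page-1), some page, some (page+1), some (page+2), none, some (tp-1), some tp], some tp) from by
    simp [cleanStepA, show tp ≠ tp - 1 from by omega]]
  simp

lemma brB3 (page tp : Int) (h12 : ¬ tp ≤ 12) (h8 : ¬ page ≤ 8) (h7 : ¬ page ≥ tp - 7) :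
    build_page_links_py_alt page tp =
      [some 1, some 2, none, some (page-2), some (page-1), some page, some (page+1), some (page+2),
       none, some (tp-1), some tp] := by
  unfold build_page_links_py_alt
  rw [if_neg h12, if_neg h8, if_neg h7]
  rw [show page + 3 = (page - 2) + 5 from by ring, pyRange_five]
  rw [show ([page-2, page-2+1, page-2+2, page-2+3, page-2+4] : List Int)
      = [page-2, page-1, page, page+1, page+2] from by simp; try omega]
  norm_num [List.zip, List.zipWith, List.foldl]
  rw [if_pos (show (1:Int) < page - 2 - 2 by omega)]
  rw [if_pos (show (1:Int) < tp - 1 - (page + 2) by omega)]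
  rfl

-- ===== VERDICT (by name: the statement is the Claim_ definition above) =====
theorem build_page_links_py_spec : Claim_equal_build_page_links_py := by
  intro page tp _
  unfold Spec_build_page_links_py
  by_cases h12 : tp ≤ 12
  · unfold build_page_links_py build_page_links_py_alt
    rw [if_pos h12, if_pos h12]
  · by_cases h8 : page ≤ 8
    · rw [brA1 page tp h12 h8, brB1 page tp h12 h8]
    · by_cases h7 : page ≥ tp - 7
      · rw [brA2 page tp h12 h8 h7, brB2 page tp h12 h8 h7]
      · rw [brA3 page tp h12 h8 h7, brB3 page tp h12 h8 h7]
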